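-- pv_equiv track=rewrite | github.com/JustinBenjamin1983/Alchemy | server/opinion/api-2/DDEntityConfirmation/__init__.py | _group_by_relationship
-- ===== SOURCE A (Python) =====
-- from typing import List, Dict, Any, Optional
--
-- def _group_by_relationship(entities: List[Dict]) -> Dict[str, List[Dict]]:
--     """Group entities by relationship type for easier review."""
--     grouped = {
--         "target": [],
--         "parent": [],
--         "subsidiary": [],
--         "counterparty": [],
--         "related_party": [],
--         "unknown": [],
--         "other": []
--     }
--
--     for entity in entities:
--         rel = entity.get("relationship_to_target", "unknown").lower()
--         if rel in grouped:
--             grouped[rel].append(entity)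
--         else:
--             grouped["other"].append(entity)
--
--     # Remove empty groups
--     return {k: v for k, v in grouped.items() if v}
-- ===== SOURCE B (Python) =====
-- def _group_by_relationship(entities):
--     """Group entities by relationship type: one filtered pass per canonical bucket."""
--     canonical = ["target", "parent", "subsidiary", "counterparty", "related_party", "unknown"]
--     canonical_set = set(canonical)
--
--     def rel(e):
--         return e.get("relationship_to_target", "unknown").lower()
--
--     buckets = [(name, [e for e in entities if rel(e) == name]) for name in canonical]
--     buckets.append(("other", [e for e in entities if rel(e) not in canonical_set]))
--     return {k: v for k, v in buckets if v}
-- ===== Notes on version B (the rewrite author's own statement) =====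
-- stated objective: alternative
-- what changed: Replaces the single-pass dict-dispatch loop (lookup-and-append per entity into a pre-built 7-key dict) by a per-bucket construction: for each canonical relationship name a filtered scan of the entity list, plus one scan for 'other', assembled in canonical order and pruned of empty buckets.
import Mathlib
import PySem

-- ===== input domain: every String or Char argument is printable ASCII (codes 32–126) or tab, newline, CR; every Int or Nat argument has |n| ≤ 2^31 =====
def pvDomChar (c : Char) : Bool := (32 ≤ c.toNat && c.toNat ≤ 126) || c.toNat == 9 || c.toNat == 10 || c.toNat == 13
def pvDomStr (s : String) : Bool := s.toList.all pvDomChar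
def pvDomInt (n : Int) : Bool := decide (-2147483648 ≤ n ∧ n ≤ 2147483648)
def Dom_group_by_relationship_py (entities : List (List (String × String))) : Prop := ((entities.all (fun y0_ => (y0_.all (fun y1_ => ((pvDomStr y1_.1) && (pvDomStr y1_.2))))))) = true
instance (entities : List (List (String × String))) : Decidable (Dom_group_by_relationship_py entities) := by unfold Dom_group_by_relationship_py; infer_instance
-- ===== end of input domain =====

-- B builds each bucket by a filtered scan in canonical order instead of A's single dispatch loop; alternative decomposition, same results.

-- ===== PORT A =====
-- rel = entity.get("relationship_to_target", "unknown").lower()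
def gbrRelA (e : List (String × String)) : String :=
  PySem.Str.lower ((PySem.Dict.mk e).getD "relationship_to_target" "unknown")

-- the initial 7-bucket dict literal
def gbrInit : PySem.Dict String (List (List (String × String))) :=
  PySem.Dict.mk [("target", []), ("parent", []), ("subsidiary", []), ("counterparty", []),
                 ("related_party", []), ("unknown", []), ("other", [])]

-- the loop body: dispatch one entity
def gbrStep (g : PySem.Dict String (List (List (String × String))))
    (e : List (String × String)) : PySem.Dict String (List (List (String × String))) :=
  let rel := gbrRelA e
  if g.contains rel then g.modify rel [] (· ++ [e]) else g.modify "other" [] (· ++ [e])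

def group_by_relationship_py (entities : List (List (String × String))) : List (String × List (List (String × String))) :=
  ((entities.foldl gbrStep gbrInit).items).filter (fun kv => !kv.2.isEmpty)

-- ===== PORT B =====
def gbrCanonical : List String :=
  ["target", "parent", "subsidiary", "counterparty", "related_party", "unknown"]

def gbrRelB (e : List (String × String)) : String :=
  PySem.Str.lower ((PySem.Dict.mk e).getD "relationship_to_target" "unknown")

def group_by_relationship_py_alt (entities : List (List (String × String))) : List (String × List (List (String × String))) :=
  let buckets :=
    (gbrCanonical.map (fun name => (name, entities.filter (fun e => gbrRelB e == name))))
      ++ [("other", entities.filter (fun e => !(gbrCanonical.contains (gbrRelB e))))]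
  buckets.filter (fun kv => !kv.2.isEmpty)

-- ===== PRECONDITION & SPEC =====
def Spec_group_by_relationship_py (entities : List (List (String × String))) (out : List (String × List (List (String × String)))) : Prop := out = group_by_relationship_py_alt entities
instance (entities : List (List (String × String))) (out : List (String × List (List (String × String)))) : Decidable (Spec_group_by_relationship_py entities out) := by unfold Spec_group_by_relationship_py; infer_instance

-- ===== CLAIM (what is proved, stated in full; the proofs are below) =====
def Claim_equal_group_by_relationship_py : Prop := ∀ (entities : List (List (String × String))), Dom_group_by_relationship_py entities → Spec_group_by_relationship_py entities (group_by_relationship_py entities)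

-- ===== LEMMAS AND PROOFS =====

-- Invariant of A's fold: starting from a 7-bucket literal, each bucket accumulates its filter.
theorem gbr_fold_inv (es : List (List (String × String)))
    (t p s c r u o : List (List (String × String))) :
    es.foldl gbrStep (PySem.Dict.mk [("target", t), ("parent", p), ("subsidiary", s),
      ("counterparty", c), ("related_party", r), ("unknown", u), ("other", o)]) =
    PySem.Dict.mk [("target", t ++ es.filter (fun e => gbrRelB e == "target")),
      ("parent", p ++ es.filter (fun e => gbrRelB e == "parent")),
      ("subsidiary", s ++ es.filter (fun e => gbrRelB e == "subsidiary")),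
      ("counterparty", c ++ es.filter (fun e => gbrRelB e == "counterparty")),
      ("related_party", r ++ es.filter (fun e => gbrRelB e == "related_party")),
      ("unknown", u ++ es.filter (fun e => gbrRelB e == "unknown")),
      ("other", o ++ es.filter (fun e => !(gbrCanonical.contains (gbrRelB e))))] := by
  induction es generalizing t p s c r u o with
  | nil => simp
  | cons e es ih =>
    have hrel : gbrRelA e = gbrRelB e := rfl
    simp only [List.foldl_cons, gbrStep, hrel]
    by_cases h1 : gbrRelB e = "target"
    · simp [PySem.Dict.contains, PySem.Dict.modify, PySem.Dict.insert, PySem.Dict.getD, PySem.Dict.get?, h1, ih, gbrCanonical]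
    · by_cases h2 : gbrRelB e = "parent"
      · simp [PySem.Dict.contains, PySem.Dict.modify, PySem.Dict.insert, PySem.Dict.getD, PySem.Dict.get?, h2, ih, gbrCanonical]
      · by_cases h3 : gbrRelB e = "subsidiary"
        · simp [PySem.Dict.contains, PySem.Dict.modify, PySem.Dict.insert, PySem.Dict.getD, PySem.Dict.get?, h3, ih, gbrCanonical]
        · by_cases h4 : gbrRelB e = "counterparty"
          · simp [PySem.Dict.contains, PySem.Dict.modify, PySem.Dict.insert, PySem.Dict.getD, PySem.Dict.get?, h4, ih, gbrCanonical]
          · by_cases h5 : gbrRelB e = "related_party"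
            · simp [PySem.Dict.contains, PySem.Dict.modify, PySem.Dict.insert, PySem.Dict.getD, PySem.Dict.get?, h5, ih, gbrCanonical]
            · by_cases h6 : gbrRelB e = "unknown"
              · simp [PySem.Dict.contains, PySem.Dict.modify, PySem.Dict.insert, PySem.Dict.getD, PySem.Dict.get?, h6, ih, gbrCanonical]
              · by_cases h7 : gbrRelB e = "other"
                · simp [PySem.Dict.contains, PySem.Dict.modify, PySem.Dict.insert, PySem.Dict.getD, PySem.Dict.get?, h7, ih, gbrCanonical]
                · simp [PySem.Dict.contains, PySem.Dict.modify, PySem.Dict.insert, PySem.Dict.getD, PySem.Dict.get?, h1, h2, h3, h4, h5, h6, h7,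
                    Ne.symm h1, Ne.symm h2, Ne.symm h3, Ne.symm h4, Ne.symm h5, Ne.symm h6, Ne.symm h7, ih, gbrCanonical]

-- ===== VERDICT (by name: the statement is the Claim_ definition above) =====
theorem group_by_relationship_py_spec : Claim_equal_group_by_relationship_py := by
  intro entities _
  unfold Spec_group_by_relationship_py group_by_relationship_py group_by_relationship_py_alt
  rw [show gbrInit = PySem.Dict.mk [("target", []), ("parent", []), ("subsidiary", []),
    ("counterparty", []), ("related_party", []), ("unknown", []), ("other", [])] from rfl,
    gbr_fold_inv]
  simp [gbrCanonical]
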